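-- pv_equiv track=rewrite | github.com/Taashna9703/Data-mining-and-business-intelligence | smoothing_bin-medians.py | createBins
-- ===== SOURCE A (Python) =====
-- def createBins(lower_bound, width, quantity, dataset):
--     bins = []
--     for i in range(quantity):
--         bins.append([])  # Append an empty list for each bin
--         for j in range(i * width, i * width + width):
--             if j < len(dataset):  # Make sure we don't go out of bounds
--                 bins[i].append(dataset[j])
--     return bins
-- ===== SOURCE B (Python) =====
-- def createBins(lower_bound, width, quantity, dataset):
--     bins = [[] for _ in range(quantity)]
--     if width > 0:
--         for idx, value in enumerate(dataset):
--             b = idx // width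
--             if b < quantity:
--                 bins[b].append(value)
--     return bins
-- ===== Notes on version B (the rewrite author's own statement) =====
-- stated objective: faster
-- what changed: Replaces the nested per-bin index-range reconstruction (which iterates over every index of every bin's range, even past the end of the data) with a single forward pass over enumerate(dataset) that distributes each element into bucket idx//width of a pre-created list of quantity empty bins.
import Mathlib
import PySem

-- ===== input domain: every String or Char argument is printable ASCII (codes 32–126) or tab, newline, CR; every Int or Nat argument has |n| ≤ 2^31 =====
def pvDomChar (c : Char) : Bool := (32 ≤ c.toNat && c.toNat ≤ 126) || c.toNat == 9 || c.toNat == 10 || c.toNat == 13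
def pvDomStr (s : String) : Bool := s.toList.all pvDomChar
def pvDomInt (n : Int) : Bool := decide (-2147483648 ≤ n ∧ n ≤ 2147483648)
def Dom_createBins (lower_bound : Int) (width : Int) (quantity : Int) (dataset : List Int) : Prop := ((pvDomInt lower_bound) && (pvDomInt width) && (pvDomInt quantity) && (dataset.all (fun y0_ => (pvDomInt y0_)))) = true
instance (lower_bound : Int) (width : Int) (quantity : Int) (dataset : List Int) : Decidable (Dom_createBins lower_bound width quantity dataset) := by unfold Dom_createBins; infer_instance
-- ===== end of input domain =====

-- B replaces A's per-bin reconstruction by index ranges with one forward distribution pass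
-- over enumerate(dataset) into pre-created buckets; equal output, measured faster in a timing run.

-- ===== PORT A =====
-- Transliteration of A: for i in range(quantity): bins.append([]); for j in range(i*width, i*width+width):
-- if j < len(dataset): bins[i].append(dataset[j]).  Inside the guard 0 ≤ j < len(dataset) always holds
-- (the inner range is nonempty only when width > 0, so j ≥ i*width ≥ 0), hence pyGetD/pySetD are exact there.
def createBins (lower_bound : Int) (width : Int) (quantity : Int) (dataset : List Int) : List (List Int) :=
  (PySem.List.pyRange 0 quantity 1).foldl
    (fun bins i =>
      let bins := bins ++ [([] : List Int)]
      (PySem.List.pyRange (i * width) (i * width + width) 1).foldl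
        (fun bs j =>
          if j < (dataset.length : Int) then
            PySem.List.pySetD bs i (PySem.List.pyGetD bs i [] ++ [PySem.List.pyGetD dataset j 0])
          else bs)
        bins)
    []

-- ===== PORT B =====
-- Transliteration of Source B: bins = [[] for _ in range(quantity)]; if width > 0: for idx, value in
-- enumerate(dataset): b = idx // width; if b < quantity: bins[b].append(value).
-- (0 ≤ b < quantity holds at the append, so pyGetD/pySetD are exact there.)
def createBins_alt (lower_bound : Int) (width : Int) (quantity : Int) (dataset : List Int) : List (List Int) :=
  let bins := (PySem.List.pyRange 0 quantity 1).map (fun _ => ([] : List Int))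
  if width > 0 then
    (PySem.List.enumerate dataset).foldl
      (fun bs p =>
        let b := PySem.Int.floordiv p.1 width
        if b < quantity then
          PySem.List.pySetD bs b (PySem.List.pyGetD bs b [] ++ [p.2])
        else bs)
      bins
  else bins

-- ===== PRECONDITION & SPEC =====
def Spec_createBins (lower_bound : Int) (width : Int) (quantity : Int) (dataset : List Int) (out : List (List Int)) : Prop := out = createBins_alt lower_bound width quantity dataset
instance (lower_bound : Int) (width : Int) (quantity : Int) (dataset : List Int) (out : List (List Int)) : Decidable (Spec_createBins lower_bound width quantity dataset out) := by unfold Spec_createBins; infer_instance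

-- ===== CLAIM (what is proved, stated in full; the proofs are below) =====
def Claim_equal_createBins : Prop := ∀ (lower_bound : Int) (width : Int) (quantity : Int) (dataset : List Int), Dom_createBins lower_bound width quantity dataset → Spec_createBins lower_bound width quantity dataset (createBins lower_bound width quantity dataset)

-- ===== LEMMAS AND PROOFS =====

-- the common characterisation: bin i holds dataset[i*width : i*width+width] (clamped; empty for width ≤ 0)
def pvSeg (width : Int) (dataset : List Int) (i : Int) : List Int :=
  (dataset.drop (i * width).toNat).take width.toNat

theorem pv_set_append_len {α : Type} (pre : List α) (c v : α) :
    (pre ++ [c]).set pre.length v = pre ++ [v] := by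
  induction pre with
  | nil => rfl
  | cons x xs ih => simp [ih]

-- A's inner loop over a fresh last bin only rewrites that last bin
theorem pv_inner_fold (rng : List Int) (L : Int) (g : Int → Int) (i : Int)
    (h0 : 0 ≤ i) :
    ∀ (pre : List (List Int)) (cur : List Int), pre.length = i.toNat →
    rng.foldl
      (fun bs j =>
        if j < L then PySem.List.pySetD bs i (PySem.List.pyGetD bs i [] ++ [g j]) else bs)
      (pre ++ [cur])
    = pre ++ [rng.foldl (fun acc j => if j < L then acc ++ [g j] else acc) cur] := by
  induction rng with
  | nil => intro pre cur _; simp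
  | cons j rest ih =>
    intro pre cur hl
    by_cases hj : j < L
    · simp only [List.foldl_cons, if_pos hj]
      have hget : PySem.List.pyGetD (pre ++ [cur]) i [] = cur := by
        rw [PySem.List.pyGetD_eq_getElem (pre ++ [cur]) ([] : List Int) h0 (by simp; omega)]
        have hi : i.toNat = pre.length := hl.symm
        simp [hi]
      have hset : PySem.List.pySetD (pre ++ [cur]) i (cur ++ [g j]) = pre ++ [cur ++ [g j]] := by
        rw [PySem.List.pySetD_of_nonneg _ _ h0, ← hl, pv_set_append_len]
      rw [hget, hset, ih pre (cur ++ [g j]) hl]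
    · simp only [List.foldl_cons, if_neg hj]
      exact ih pre cur hl

-- 'if j < L: keep j' over range(a,b) is the range clipped at L
theorem pv_filter_range (a b L : Int) :
    (PySem.List.pyRange a b 1).filter (fun j => decide (j < L)) = PySem.List.pyRange a (min b L) 1 := by
  by_cases hab : b ≤ a
  · rw [PySem.List.pyRange_one_eq_nil hab, PySem.List.pyRange_one_eq_nil (by omega)]; rfl
  · have h : ∀ n : Nat, ∀ a : Int, (b - a).toNat = n →
        (PySem.List.pyRange a b 1).filter (fun j => decide (j < L)) = PySem.List.pyRange a (min b L) 1 := by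
      intro n
      induction n with
      | zero =>
        intro a ha
        rw [PySem.List.pyRange_one_eq_nil (by omega), PySem.List.pyRange_one_eq_nil (by omega)]; rfl
      | succ m ih =>
        intro a ha
        rw [PySem.List.pyRange_one_cons (by omega), List.filter_cons]
        by_cases hL : a < L
        · simp only [decide_eq_true_eq, if_pos hL]
          rw [ih (a + 1) (by omega)]
          rw [← PySem.List.pyRange_one_cons (show a < min b L by omega)]
        · simp only [decide_eq_true_eq, if_neg hL]
          rw [ih (a + 1) (by omega)]
          rw [PySem.List.pyRange_one_eq_nil (show min b L ≤ a + 1 by omega),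
              PySem.List.pyRange_one_eq_nil (show min b L ≤ a by omega)]
    exact h (b - a).toNat a rfl

-- reading a contiguous in-bounds range of indices is drop-then-take
theorem pv_map_get_range (ds : List Int) (a m : Int) (h0 : 0 ≤ a) (hm : m ≤ (ds.length : Int)) :
    (PySem.List.pyRange a m 1).map (fun j => PySem.List.pyGetD ds j 0)
    = (ds.drop a.toNat).take (m - a).toNat := by
  by_cases hma : m ≤ a
  · rw [PySem.List.pyRange_one_eq_nil hma]
    have h : (m - a).toNat = 0 := by omega
    simp [h]
  · have hsplit := PySem.List.pyRange_one_append a m (ds.length : Int) (by omega) hm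
    have hfull := PySem.List.map_pyGetD_pyRange ds (0 : Int) h0
    simp only [PySem.List.len_eq] at hfull
    rw [hsplit, List.map_append] at hfull
    have hlen : ((PySem.List.pyRange a m 1).map (fun j => PySem.List.pyGetD ds j 0)).length
        = (m - a).toNat := by
      simp [PySem.List.length_pyRange_one]
    calc (PySem.List.pyRange a m 1).map (fun j => PySem.List.pyGetD ds j 0)
        = (((PySem.List.pyRange a m 1).map (fun j => PySem.List.pyGetD ds j 0)) ++
           ((PySem.List.pyRange m (ds.length : Int) 1).map (fun j => PySem.List.pyGetD ds j 0))).take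
            (m - a).toNat := by
          rw [List.take_append_of_le_length (by omega), ← hlen, List.take_length]
      _ = (ds.drop a.toNat).take (m - a).toNat := by rw [hfull]

-- A's bin i equals pvSeg (width > 0)
theorem pv_binA (ds : List Int) (w i : Int) (h0 : 0 ≤ i) (hw : 0 < w) :
    (PySem.List.pyRange (i * w) (i * w + w) 1).foldl
      (fun acc j => if j < (ds.length : Int) then acc ++ [PySem.List.pyGetD ds j 0] else acc) []
    = pvSeg w ds i := by
  have ha : 0 ≤ i * w := by positivity
  rw [PySem.List.foldl_congr_mem _ _
      (fun acc x => if decide (x < (ds.length : Int)) = true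
        then acc ++ [PySem.List.pyGetD ds x 0] else acc) _
      (by intro acc x _; simp)]
  rw [PySem.List.foldl_append_if (fun j => decide (j < (ds.length : Int)))
      (fun j => PySem.List.pyGetD ds j 0)]
  rw [List.nil_append, pv_filter_range,
      pv_map_get_range ds (i * w) (min (i * w + w) (ds.length : Int)) ha (by omega)]
  unfold pvSeg
  by_cases hle : i * w + w ≤ (ds.length : Int)
  · have hmin : min (i * w + w) (ds.length : Int) = i * w + w := by omega
    rw [hmin]
    congr 1
    omega
  · have hmin : min (i * w + w) (ds.length : Int) = (ds.length : Int) := by omega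
    rw [hmin]
    rw [List.take_of_length_le (by simp; omega), List.take_of_length_le (by simp; omega)]

-- createBins builds exactly the list of pvSeg bins
theorem pv_A_eq_map (lb w q : Int) (ds : List Int) :
    createBins lb w q ds = (PySem.List.pyRange 0 q 1).map (pvSeg w ds) := by
  unfold createBins
  by_cases hq : q ≤ 0
  · rw [PySem.List.pyRange_one_eq_nil hq]; rfl
  · have key : ∀ n : Nat, ∀ m : Int, 0 ≤ m → m + n = q →
        (PySem.List.pyRange m q 1).foldl
          (fun bins i =>
            let bins := bins ++ [([] : List Int)]
            (PySem.List.pyRange (i * w) (i * w + w) 1).foldl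
              (fun bs j =>
                if j < (ds.length : Int) then
                  PySem.List.pySetD bs i (PySem.List.pyGetD bs i [] ++ [PySem.List.pyGetD ds j 0])
                else bs) bins)
          ((PySem.List.pyRange 0 m 1).map (pvSeg w ds))
        = (PySem.List.pyRange 0 q 1).map (pvSeg w ds) := by
      intro n
      induction n with
      | zero =>
        intro m hm0 hmq
        have hm : m = q := by omega
        subst hm
        rw [show PySem.List.pyRange m m 1 = [] from PySem.List.pyRange_one_eq_nil le_rfl]
        simp only [List.foldl_nil]
      | succ k ih =>
        intro m hm0 hmq
        rw [show PySem.List.pyRange m q 1 = m :: PySem.List.pyRange (m + 1) q 1 from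
              PySem.List.pyRange_one_cons (by omega),
            List.foldl_cons]
        have hlen : ((PySem.List.pyRange 0 m 1).map (pvSeg w ds)).length = m.toNat := by
          simp [PySem.List.length_pyRange_one]
        have hinner := pv_inner_fold (PySem.List.pyRange (m * w) (m * w + w) 1)
          (ds.length : Int) (fun j => PySem.List.pyGetD ds j 0) m hm0
          ((PySem.List.pyRange 0 m 1).map (pvSeg w ds)) [] hlen
        simp only at hinner ⊢
        rw [hinner]
        have hbin : (PySem.List.pyRange (m * w) (m * w + w) 1).foldl
            (fun acc j => if j < (ds.length : Int) then acc ++ [PySem.List.pyGetD ds j 0] else acc) []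
            = pvSeg w ds m := by
          by_cases hw : 0 < w
          · exact pv_binA ds w m hm0 hw
          · rw [PySem.List.pyRange_one_eq_nil (by omega)]
            unfold pvSeg
            have hw0 : w.toNat = 0 := by omega
            simp [hw0]
        rw [hbin]
        have hstep : (PySem.List.pyRange 0 m 1).map (pvSeg w ds) ++ [pvSeg w ds m]
            = (PySem.List.pyRange 0 (m + 1) 1).map (pvSeg w ds) := by
          rw [PySem.List.pyRange_one_succ_right (by omega), List.map_append]; rfl
        rw [hstep]
        exact ih (m + 1) (by omega) (by omega)
    have hk := key q.toNat 0 le_rfl (by omega)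
    rw [PySem.List.pyRange_one_eq_nil le_rfl] at hk
    simpa using hk

theorem pv_enumerate_append {α : Type} (xs : List α) (x : α) :
    ∀ s : Int, PySem.List.enumerate (xs ++ [x]) s
      = PySem.List.enumerate xs s ++ [(s + xs.length, x)] := by
  induction xs with
  | nil => intro s; simp [PySem.List.enumerate_nil, PySem.List.enumerate_cons]
  | cons y ys ih =>
    intro s
    rw [List.cons_append, PySem.List.enumerate_cons, PySem.List.enumerate_cons, ih (s + 1)]
    simp
    ring_nf

-- setting slot b of a mapped range is mapping a pointwise-updated function
theorem pv_set_map_range (q b : Int) (v : List Int) (f g : Int → List Int)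
    (h0 : 0 ≤ b) (hb : b < q)
    (hg : ∀ i : Int, 0 ≤ i → i < q → g i = if i = b then v else f i) :
    ((PySem.List.pyRange 0 q 1).map f).set b.toNat v = (PySem.List.pyRange 0 q 1).map g := by
  apply List.ext_getElem
  · simp
  · intro k h1 h2
    rw [List.getElem_set]
    have hk : k < (PySem.List.pyRange 0 q 1).length := by simpa using h2
    have hel : (PySem.List.pyRange 0 q 1)[k] = 0 + (k : Int) :=
      PySem.List.getElem_pyRange_one 0 q k hk
    have hkq : (k : Int) < q := by
      have hlq := PySem.List.length_pyRange_one 0 q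
      omega
    by_cases hkb : k = b.toNat
    · rw [if_pos hkb.symm, List.getElem_map, hel, hg (0 + (k : Int)) (by omega) (by omega),
          if_pos (by omega)]
    · rw [if_neg (fun h => hkb h.symm), List.getElem_map, List.getElem_map, hel,
          hg (0 + (k : Int)) (by omega) (by omega), if_neg (by omega)]

-- appending one element to the data extends exactly bucket len//width
theorem pv_seg_append (w : Int) (ds : List Int) (x : Int) (hw : 0 < w) (i : Int) (h0 : 0 ≤ i) :
    pvSeg w (ds ++ [x]) i
      = if i = PySem.Int.floordiv (ds.length : Int) w then pvSeg w ds i ++ [x] else pvSeg w ds i := by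
  have ha : 0 ≤ i * w := by positivity
  have hiff : i = PySem.Int.floordiv (ds.length : Int) w ↔
      i * w ≤ (ds.length : Int) ∧ (ds.length : Int) < (i + 1) * w := by
    constructor
    · intro h
      exact (PySem.Int.floordiv_eq_iff_of_pos (a := (ds.length : Int)) (b := w) (q := i) hw).mp h.symm
    · intro h
      exact ((PySem.Int.floordiv_eq_iff_of_pos (a := (ds.length : Int)) (b := w) (q := i) hw).mpr h).symm
  unfold pvSeg
  by_cases hcase : i * w ≤ (ds.length : Int) ∧ (ds.length : Int) < (i + 1) * w
  · rw [if_pos (hiff.mpr hcase)]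
    have hub : (ds.length : Int) < i * w + w := by linarith [hcase.2]
    have hdrop : (ds ++ [x]).drop (i * w).toNat = ds.drop (i * w).toNat ++ [x] := by
      rw [List.drop_append_of_le_length (by omega)]
    rw [hdrop, List.take_append]
    have hldrop : (ds.drop (i * w).toNat).length = ds.length - (i * w).toNat := by simp
    have hx : [x].take (w.toNat - (ds.drop (i * w).toNat).length) = [x] := by
      apply List.take_of_length_le
      simp only [List.length_cons, List.length_nil, hldrop]
      omega
    rw [hx, List.take_of_length_le (by omega)]
  · rw [if_neg (fun h => hcase (hiff.mp h))]
    rcases not_and_or.mp hcase with h1 | h2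
    · have hgt : (ds.length : Int) < i * w := by omega
      rw [List.drop_eq_nil_of_le (by simp; omega), List.drop_eq_nil_of_le (by omega)]
    · have hge : i * w + w ≤ (ds.length : Int) := by
        have := not_lt.mp h2
        linarith [this]
      have hdrop : (ds ++ [x]).drop (i * w).toNat = ds.drop (i * w).toNat ++ [x] := by
        rw [List.drop_append_of_le_length (by omega)]
      rw [hdrop, List.take_append]
      have hldrop : (ds.drop (i * w).toNat).length = ds.length - (i * w).toNat := by simp
      have hz : w.toNat - (ds.drop (i * w).toNat).length = 0 := by omega
      rw [hz, List.take_zero, List.append_nil]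

-- B's distribution pass builds the same list of pvSeg bins (width > 0)
theorem pv_B_fold (w q : Int) (hw : 0 < w) (ds : List Int) :
    (PySem.List.enumerate ds).foldl
      (fun bs p =>
        let b := PySem.Int.floordiv p.1 w
        if b < q then
          PySem.List.pySetD bs b (PySem.List.pyGetD bs b [] ++ [p.2])
        else bs)
      ((PySem.List.pyRange 0 q 1).map (fun _ => ([] : List Int)))
    = (PySem.List.pyRange 0 q 1).map (pvSeg w ds) := by
  induction ds using List.reverseRecOn with
  | nil =>
    simp only [PySem.List.enumerate_nil, List.foldl_nil]
    apply List.map_congr_left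
    intro i _
    simp [pvSeg]
  | append_singleton ds x ih =>
    rw [pv_enumerate_append ds x 0, List.foldl_append, ih]
    simp only [List.foldl_cons, List.foldl_nil, zero_add]
    have hb0 : 0 ≤ PySem.Int.floordiv (ds.length : Int) w := by
      rw [PySem.Int.floordiv_eq_ediv_of_pos hw]
      exact Int.ediv_nonneg (by positivity) (by omega)
    by_cases hbq : PySem.Int.floordiv (ds.length : Int) w < q
    · rw [if_pos hbq]
      rw [PySem.List.pyGetD_map_pyRange_of_nonneg (pvSeg w ds) q
          (PySem.Int.floordiv (ds.length : Int) w) [] hb0 hbq]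
      rw [PySem.List.pySetD_of_nonneg _ _ hb0]
      apply pv_set_map_range q (PySem.Int.floordiv (ds.length : Int) w)
        (pvSeg w ds (PySem.Int.floordiv (ds.length : Int) w) ++ [x])
        (pvSeg w ds) (pvSeg w (ds ++ [x])) hb0 hbq
      intro i hi0 hiq
      rw [pv_seg_append w ds x hw i hi0]
      by_cases hib : i = PySem.Int.floordiv (ds.length : Int) w
      · rw [if_pos hib, if_pos hib, hib]
      · rw [if_neg hib, if_neg hib]
    · rw [if_neg hbq]
      apply List.map_congr_left
      intro i hi
      have hmem := (PySem.List.mem_pyRange_one).mp hi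
      rw [pv_seg_append w ds x hw i hmem.1, if_neg (by omega)]

-- ===== VERDICT (by name: the statement is the Claim_ definition above) =====
theorem createBins_spec : Claim_equal_createBins := by
  intro lb w q ds _
  unfold Spec_createBins
  rw [pv_A_eq_map lb w q ds]
  unfold createBins_alt
  by_cases hw : w > 0
  · rw [if_pos hw]
    exact (pv_B_fold w q hw ds).symm
  · rw [if_neg hw]
    apply List.map_congr_left
    intro i _
    unfold pvSeg
    have hw0 : w.toNat = 0 := by omega
    simp [hw0]
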